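-- pv_equiv track=rewrite | github.com/Pexego/PXGO_00053_2013_VT | project-addons/sale_promotions_extend/models/rule.py | get_new_lines
-- ===== SOURCE A (Python) =====
-- def get_new_lines(products_exp, products_tag):
--     new_lines = []
--     for count, product in enumerate(products_exp):
--         if count >= products_tag :
--             break
--         else:
--             # Group by products with same price
--             if count > 0 and product[1] == products_exp[count - 1][1]:
--                 new_lines[len(new_lines) - 1][0] += 1
--             else:
--                 new_lines.append([1, product[0], product[1]])
--     return new_lines
-- ===== SOURCE B (Python) =====
-- def get_new_lines(products_exp, products_tag):
--     # Run-scanner: take the clamped prefix, then repeatedly peel off the run of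
--     # equal-price products from the front and emit one [run_length, id, price] line.
--     rest = products_exp[:max(0, products_tag)]
--     new_lines = []
--     while rest:
--         pid, price = rest[0]
--         k = 1
--         for q in rest[1:]:
--             if q[1] == price:
--                 k += 1
--             else:
--                 break
--         new_lines.append([k, pid, price])
--         rest = rest[k:]
--     return new_lines
-- ===== Notes on version B (the rewrite author's own statement) =====
-- stated objective: simpler
-- what changed: Replaced the enumerate loop with its break, look-back index comparison against products_exp[count-1] and in-place increment of the last emitted line by a run-scanner that slices the clamped prefix once and peels off each maximal run of equal-price products from the front, emitting its line in one step.
import Mathlib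
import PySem

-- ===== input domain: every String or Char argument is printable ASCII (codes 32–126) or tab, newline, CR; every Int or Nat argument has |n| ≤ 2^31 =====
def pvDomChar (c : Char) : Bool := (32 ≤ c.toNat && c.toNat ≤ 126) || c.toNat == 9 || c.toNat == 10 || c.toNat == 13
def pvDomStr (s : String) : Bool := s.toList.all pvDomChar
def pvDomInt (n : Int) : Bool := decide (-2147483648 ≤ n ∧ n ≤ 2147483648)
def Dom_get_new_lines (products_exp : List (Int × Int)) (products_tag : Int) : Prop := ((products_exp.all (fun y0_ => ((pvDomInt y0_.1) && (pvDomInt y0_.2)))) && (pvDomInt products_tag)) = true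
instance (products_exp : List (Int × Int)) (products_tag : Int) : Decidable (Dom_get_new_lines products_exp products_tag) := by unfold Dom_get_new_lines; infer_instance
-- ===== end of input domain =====

-- B replaces A's enumerate loop (look-back index + in-place increment of the last line)
-- by a run-scanner over the clamped prefix; objective: simpler.

-- ===== PORT A =====
-- new_lines[len(new_lines)-1][0] += 1 : bump the first entry of the last line.
-- (A only executes it when new_lines is nonempty; the [] case is unreachable.)
def bumpLast : List (List Int) → List (List Int)
  | [] => []
  | [l] => [match l with | c :: rest => (c + 1) :: rest | [] => []]
  | x :: xs => x :: bumpLast xs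

-- the 'for count, product in enumerate(products_exp)' loop; 'break' returns the accumulator.
-- products_exp[count-1] is always in range when count > 0, so pyGetD's default is never used.
def loopA (pe : List (Int × Int)) (tag : Int) : List (Int × (Int × Int)) → List (List Int) → List (List Int)
  | [], acc => acc
  | (count, product) :: rest, acc =>
    if count ≥ tag then acc
    else if 0 < count ∧ product.2 = (PySem.List.pyGetD pe (count - 1) (0, 0)).2 then
      loopA pe tag rest (bumpLast acc)
    else
      loopA pe tag rest (acc ++ [[1, product.1, product.2]])

def get_new_lines (products_exp : List (Int × Int)) (products_tag : Int) : List (List Int) :=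
  loopA products_exp products_tag (PySem.List.enumerate products_exp) []

-- ===== PORT B =====
-- the inner 'for q in rest[1:]' counting loop: length of the front run of price p, plus nothing else
def runLen (p : Int) : List (Int × Int) → Nat
  | [] => 0
  | q :: t => if q.2 = p then 1 + runLen p t else 0

theorem runLen_le (p : Int) : ∀ t, runLen p t ≤ t.length
  | [] => Nat.le_refl _
  | q :: t => by
    simp only [runLen]
    split
    · have := runLen_le p t; simp; omega
    · simp

-- the 'while rest:' loop: peel the front run, emit its line, continue on rest[k:]
def buildRuns : List (Int × Int) → List (List Int)
  | [] => []
  | (pid, price) :: t =>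
    -- k = 1 + runLen price t is the inner counting loop's result; rest = rest[k:]
    [((1 + runLen price t : Nat) : Int), pid, price] ::
      buildRuns (((pid, price) :: t).drop (1 + runLen price t))
termination_by l => l.length
decreasing_by
  have := runLen_le price t
  simp only [List.length_drop, List.length_cons]
  omega

def get_new_lines_alt (products_exp : List (Int × Int)) (products_tag : Int) : List (List Int) :=
  buildRuns (products_exp.take (max 0 products_tag).toNat)

-- ===== PRECONDITION & SPEC =====
def Spec_get_new_lines (products_exp : List (Int × Int)) (products_tag : Int) (out : List (List Int)) : Prop := out = get_new_lines_alt products_exp products_tag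
instance (products_exp : List (Int × Int)) (products_tag : Int) (out : List (List Int)) : Decidable (Spec_get_new_lines products_exp products_tag out) := by unfold Spec_get_new_lines; infer_instance

-- ===== CLAIM (what is proved, stated in full; the proofs are below) =====
def Claim_equal_get_new_lines : Prop := ∀ (products_exp : List (Int × Int)) (products_tag : Int), Dom_get_new_lines products_exp products_tag → Spec_get_new_lines products_exp products_tag (get_new_lines products_exp products_tag)

-- ===== LEMMAS AND PROOFS =====

-- index-free version of A's loop: carries the previous element's price instead of look-back indexing
def foldA : List (List Int) → Option Int → List (Int × Int) → List (List Int)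
  | acc, _, [] => acc
  | acc, prev, (pid, price) :: t =>
    if prev = some price then foldA (bumpLast acc) (some price) t
    else foldA (acc ++ [[1, pid, price]]) (some price) t

theorem buildRuns_nil : buildRuns [] = [] := by unfold buildRuns; rfl

theorem buildRuns_cons (pid price : Int) (t : List (Int × Int)) :
    buildRuns ((pid, price) :: t) =
      [((1 + runLen price t : Nat) : Int), pid, price] :: buildRuns (t.drop (runLen price t)) := by
  have hd : List.drop (1 + runLen price t) ((pid, price) :: t) = List.drop (runLen price t) t := by
    rw [Nat.add_comm, List.drop_succ_cons]
  conv_lhs => rw [buildRuns]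
  rw [hd]

theorem bumpLast_append (acc : List (List Int)) (c x p : Int) :
    bumpLast (acc ++ [[c, x, p]]) = acc ++ [[c + 1, x, p]] := by
  induction acc with
  | nil => rfl
  | cons a as ih =>
    cases as with
    | nil => rfl
    | cons b bs =>
      show a :: bumpLast ((b :: bs) ++ [[c, x, p]]) = a :: ((b :: bs) ++ [[c + 1, x, p]])
      rw [ih]

-- consuming the front run of price p just adds its length to the last line
theorem foldA_run (p : Int) : ∀ (t : List (Int × Int)) (acc : List (List Int)) (c x : Int),
    foldA (acc ++ [[c, x, p]]) (some p) t =
      foldA (acc ++ [[c + runLen p t, x, p]]) (some p) (t.drop (runLen p t))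
  | [], acc, c, x => by simp [runLen, foldA]
  | ⟨q1, q2⟩ :: t, acc, c, x => by
    by_cases h : q2 = p
    · subst h
      have hr : runLen q2 ((q1, q2) :: t) = 1 + runLen q2 t := by simp [runLen]
      have hd : List.drop (1 + runLen q2 t) ((q1, q2) :: t) = List.drop (runLen q2 t) t := by
        rw [Nat.add_comm, List.drop_succ_cons]
      rw [hr, hd, foldA, if_pos rfl, bumpLast_append, foldA_run q2 t acc (c + 1) x]
      have hc : c + 1 + ((runLen q2 t : Nat) : Int) = c + ((1 + runLen q2 t : Nat) : Int) := by
        push_cast; ring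
      rw [hc]
    · have hr : runLen p ((q1, q2) :: t) = 0 := by simp [runLen, h]
      rw [hr, List.drop_zero]
      norm_num

theorem runLen_drop (p : Int) : ∀ (t : List (Int × Int)) (q : Int × Int) (t' : List (Int × Int)),
    t.drop (runLen p t) = q :: t' → q.2 ≠ p
  | [], q, t' => by simp [runLen]
  | ⟨r1, r2⟩ :: t, q, t' => by
    by_cases h : r2 = p
    · subst h
      have hr : runLen r2 ((r1, r2) :: t) = 1 + runLen r2 t := by simp [runLen]
      have hd : List.drop (1 + runLen r2 t) ((r1, r2) :: t) = List.drop (runLen r2 t) t := by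
        rw [Nat.add_comm, List.drop_succ_cons]
      rw [hr, hd]
      exact runLen_drop r2 t q t'
    · have hr : runLen p ((r1, r2) :: t) = 0 := by simp [runLen, h]
      rw [hr, List.drop_zero]
      intro he
      injection he with h1 _
      subst h1
      exact h

theorem foldA_eq_buildRuns : ∀ (l : List (Int × Int)) (acc : List (List Int)) (prev : Option Int),
    (∀ q t', l = q :: t' → prev ≠ some q.2) →
    foldA acc prev l = acc ++ buildRuns l
  | [], acc, prev, _ => by simp [foldA, buildRuns_nil]
  | (pid, price) :: t, acc, prev, h => by
    have hne : prev ≠ some price := h (pid, price) t rfl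
    simp only [foldA, if_neg hne]
    rw [foldA_run price t acc 1 pid]
    rw [foldA_eq_buildRuns (t.drop (runLen price t)) _ (some price)
        (fun q t' hq hp => runLen_drop price t q t' hq (by injection hp with h'; exact h'.symm))]
    rw [buildRuns_cons]
    have hc : ((1 + runLen price t : Nat) : Int) = 1 + ((runLen price t : Nat) : Int) := by
      push_cast; ring
    rw [hc]
    simp [List.append_assoc]
termination_by l => l.length
decreasing_by
  have := runLen_le price t
  simp only [List.length_drop, List.length_cons]
  omega

-- previous price seen by A at index i
def prevAt (pe : List (Int × Int)) : Nat → Option Int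
  | 0 => none
  | Nat.succ i => (pe[i]?).map Prod.snd

theorem loopA_eq_foldA (pe : List (Int × Int)) (tag : Int) :
    ∀ (k i : Nat) (acc : List (List Int)), pe.length - i = k → i ≤ pe.length →
    loopA pe tag (PySem.List.enumerate (pe.drop i) (i : Int)) acc =
      foldA acc (prevAt pe i) ((pe.drop i).take (min pe.length (max 0 tag).toNat - i)) := by
  intro k
  induction k with
  | zero =>
    intro i acc hk hi
    have hnil : pe.drop i = [] := by
      apply List.eq_nil_of_length_eq_zero; simp [List.length_drop]; omega
    simp [hnil, foldA, loopA]
  | succ k ih =>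
    intro i acc hk hi
    have hilt : i < pe.length := by omega
    have hdrop : pe.drop i = pe[i] :: pe.drop (i + 1) := List.drop_eq_getElem_cons hilt
    rcases hab : pe[i] with ⟨a, b⟩
    rw [hab] at hdrop
    rw [hdrop, PySem.List.enumerate_cons]
    by_cases hge : (i : Int) ≥ tag
    · rw [loopA]
      simp only [if_pos hge]
      have h0 : min pe.length (max 0 tag).toNat - i = 0 := by omega
      rw [h0]
      simp [foldA]
    · have hlt : i < (max 0 tag).toNat := by omega
      have hmin : min pe.length (max 0 tag).toNat - i
          = (min pe.length (max 0 tag).toNat - (i + 1)) + 1 := by omega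
      rw [loopA]
      simp only [if_neg hge]
      rw [hmin, List.take_succ_cons, foldA]
      have hcond : (0 < (i : Int) ∧ (a, b).2 = (PySem.List.pyGetD pe ((i : Int) - 1) (0, 0)).2) ↔
          (prevAt pe i = some b) := by
        cases i with
        | zero => simp [prevAt]
        | succ j =>
          have h1 : (((j + 1 : Nat) : Int)) - 1 = (j : Int) := by push_cast; ring
          have hj : j < pe.length := by omega
          rw [h1, PySem.List.pyGetD_natCast]
          simp [prevAt, List.getD, List.getElem?_eq_getElem hj, eq_comm]
      have hprev : prevAt pe (i + 1) = some b := by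
        simp [prevAt, List.getElem?_eq_getElem hilt, hab]
      have hcast : ((i : Int) + 1) = ((i + 1 : Nat) : Int) := by push_cast; ring
      rw [hcast]
      by_cases hc : prevAt pe i = some b
      · rw [if_pos (hcond.mpr hc), if_pos hc]
        rw [ih (i + 1) (bumpLast acc) (by omega) (by omega), hprev]
      · rw [if_neg (fun hh => hc (hcond.mp hh)), if_neg hc]
        rw [ih (i + 1) (acc ++ [[1, (a, b).1, (a, b).2]]) (by omega) (by omega), hprev]

-- ===== VERDICT (by name: the statement is the Claim_ definition above) =====
theorem get_new_lines_spec : Claim_equal_get_new_lines := by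
  intro pe tag _
  unfold Spec_get_new_lines get_new_lines get_new_lines_alt
  have h0 : PySem.List.enumerate pe = PySem.List.enumerate (pe.drop 0) ((0 : Nat) : Int) := by simp
  rw [h0, loopA_eq_foldA pe tag pe.length 0 [] (by omega) (by omega)]
  have htake : pe.take (min pe.length (max 0 tag).toNat - 0) = pe.take (max 0 tag).toNat := by
    rw [Nat.sub_zero]
    rcases le_total (max 0 tag).toNat pe.length with h | h
    · rw [min_eq_right h]
    · rw [min_eq_left h, List.take_length, List.take_of_length_le h]
  rw [List.drop_zero, htake,
    foldA_eq_buildRuns _ [] (prevAt pe 0) (by intro q t' _ hp; simp [prevAt] at hp)]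
  simp
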